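-- pv_equiv track=rewrite | github.com/aandreeva13/European-Project-Call-Monitoring-Agent | eu-call-finder/3_planning/smart_planner.py | _estimate_trl
-- ===== SOURCE A (Python) =====
-- def _estimate_trl(description: str) -> int:
--     """Estimate Technology Readiness Level from description."""
--     trl_indicators = {
--         9: ["commercial", "market ready", "deployed", "operational"],
--         8: ["pilot", "demonstration", "field tested"],
--         7: ["prototype", "system prototype", "integration"],
--         6: ["validation", "model", "simulation"],
--         5: ["laboratory", "component"],
--         4: ["proof of concept", "proof-of-concept", "poc"],
--         3: ["experimental", "proof of principle"],
--         2: ["concept", "formulation", "design"],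
--         1: ["basic research", "fundamental"],
--     }
--
--     desc_lower = description.lower()
--     for trl, indicators in sorted(trl_indicators.items(), reverse=True):
--         if any(ind in desc_lower for ind in indicators):
--             return trl
--     return 5  # Default TRL
-- ===== SOURCE B (Python) =====
-- def _estimate_trl(description: str) -> int:
--     """Estimate Technology Readiness Level from description."""
--     keyword_trl = {
--         "commercial": 9, "market ready": 9, "deployed": 9, "operational": 9,
--         "pilot": 8, "demonstration": 8, "field tested": 8,
--         "prototype": 7, "system prototype": 7, "integration": 7,
--         "validation": 6, "model": 6, "simulation": 6,
--         "laboratory": 5, "component": 5,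
--         "proof of concept": 4, "proof-of-concept": 4, "poc": 4,
--         "experimental": 3, "proof of principle": 3,
--         "concept": 2, "formulation": 2, "design": 2,
--         "basic research": 1, "fundamental": 1,
--     }
--     text = description.lower()
--     best = 0
--     for i in range(len(text)):
--         for kw, trl in keyword_trl.items():
--             if trl > best and text.startswith(kw, i):
--                 best = trl
--     return best if best else 5
-- ===== Notes on version B (the rewrite author's own statement) =====
-- stated objective: alternative
-- what changed: Replaces A's keyword-driven search (descending-sorted dict of level->keywords, substring test per keyword, early return at first hit) with a text-driven scan: a flat keyword->TRL table and one pass over the positions of the lowercased text, checking with startswith which keyword begins at each position and keeping the best TRL in an accumulator, 5 if none.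
import Mathlib
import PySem

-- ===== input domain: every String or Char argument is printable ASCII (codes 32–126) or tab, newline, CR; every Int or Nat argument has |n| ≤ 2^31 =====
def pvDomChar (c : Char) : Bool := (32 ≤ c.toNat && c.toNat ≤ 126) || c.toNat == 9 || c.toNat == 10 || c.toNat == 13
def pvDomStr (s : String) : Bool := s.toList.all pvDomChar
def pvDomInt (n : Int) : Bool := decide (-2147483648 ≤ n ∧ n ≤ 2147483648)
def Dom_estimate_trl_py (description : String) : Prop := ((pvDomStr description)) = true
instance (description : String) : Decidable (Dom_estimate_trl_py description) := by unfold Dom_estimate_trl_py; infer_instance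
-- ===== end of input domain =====

-- B replaces A's keyword-driven substring search (descending-sorted early-return loop) with a
-- text-driven scan: one pass over the positions of the lowercased text, checking at each position
-- which keyword starts there and keeping the best TRL; default 5 when nothing matches (alternative decomposition).


-- ===== PORT A =====
-- A's dict literal (insertion order 9..1)
def trlIndicators : List (Int × List String) :=
  [(9, ["commercial", "market ready", "deployed", "operational"]),
   (8, ["pilot", "demonstration", "field tested"]),
   (7, ["prototype", "system prototype", "integration"]),
   (6, ["validation", "model", "simulation"]),
   (5, ["laboratory", "component"]),
   (4, ["proof of concept", "proof-of-concept", "poc"]),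
   (3, ["experimental", "proof of principle"]),
   (2, ["concept", "formulation", "design"]),
   (1, ["basic research", "fundamental"])]

-- A's for-loop with early return
def findTrl (descLower : String) : List (Int × List String) → Int
  | [] => 5
  | p :: rest =>
    if p.2.any (fun ind => PySem.Str.isIn ind descLower) then p.1
    else findTrl descLower rest

-- sorted(trl_indicators.items(), reverse=True): ported with key = fst, exact here
-- because all keys are distinct so Python's tuple comparison never reaches the lists
def estimate_trl_py (description : String) : Int :=
  findTrl (PySem.Str.lower description)
    (PySem.List.sorted trlIndicators (fun p => p.1) true)

-- ===== PORT B =====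
-- B's dict literal keyword -> trl, in Source B's insertion order
def keywordTrl : List (String × Int) :=
  [("commercial", 9), ("market ready", 9), ("deployed", 9), ("operational", 9),
   ("pilot", 8), ("demonstration", 8), ("field tested", 8),
   ("prototype", 7), ("system prototype", 7), ("integration", 7),
   ("validation", 6), ("model", 6), ("simulation", 6),
   ("laboratory", 5), ("component", 5),
   ("proof of concept", 4), ("proof-of-concept", 4), ("poc", 4),
   ("experimental", 3), ("proof of principle", 3),
   ("concept", 2), ("formulation", 2), ("design", 2),
   ("basic research", 1), ("fundamental", 1)]

-- text.startswith(kw, i) for 0 ≤ i: exactly kw.toList <+: (text.drop i) (drop clamps past the end,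
-- where Python's startswith with a nonempty kw is likewise False)
def estimate_trl_py_alt (description : String) : Int :=
  let text := (PySem.Str.lower description).toList
  let best := (List.range text.length).foldl
    (fun b i => keywordTrl.foldl
      (fun b p => if b < p.2 && p.1.toList.isPrefixOf (text.drop i) then p.2 else b) b) 0
  if best = 0 then 5 else best

-- ===== PRECONDITION & SPEC =====
def Spec_estimate_trl_py (description : String) (out : Int) : Prop := out = estimate_trl_py_alt description
instance (description : String) (out : Int) : Decidable (Spec_estimate_trl_py description out) := by unfold Spec_estimate_trl_py; infer_instance

-- ===== CLAIM (what is proved, stated in full; the proofs are below) =====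
def Claim_equal_estimate_trl_py : Prop := ∀ (description : String), Dom_estimate_trl_py description → Spec_estimate_trl_py description (estimate_trl_py description)

-- ===== LEMMAS AND PROOFS =====

-- A's loop returns the first hit of the list, 5 when none
lemma findTrl_eq_filter (dl : String) (L : List (Int × List String)) :
    findTrl dl L =
      (match L.filter (fun p => p.2.any (fun ind => PySem.Str.isIn ind dl)) with
       | [] => 5
       | q :: _ => q.1) := by
  induction L with
  | nil => simp [findTrl]
  | cons p rest ih =>
    simp only [findTrl, List.filter_cons]
    by_cases hc : (p.2.any fun ind => PySem.Str.isIn ind dl) = true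
    · rw [if_pos hc, if_pos hc]
    · rw [if_neg hc, if_neg hc]
      exact ih

lemma sorted_trl : PySem.List.sorted trlIndicators (fun p => p.1) true = trlIndicators := by
  decide

lemma keywordTrl_eq :
    keywordTrl = trlIndicators.flatMap (fun q => q.2.map (fun kw => (kw, q.1))) := by
  decide

-- the conditional-max step is a guarded max
lemma step_eq (t : List Char) (i : Nat) :
    (fun (b : Int) (p : String × Int) =>
        if b < p.2 && p.1.toList.isPrefixOf (t.drop i) then p.2 else b) =
    (fun b p => if p.1.toList.isPrefixOf (t.drop i) then max b p.2 else b) := by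
  funext b p
  by_cases h : p.1.toList.isPrefixOf (t.drop i)
  · simp [h]; omega
  · simp [h]

-- guarded-max fold = plain max fold over the filtered values
lemma fold_guard_max {α : Type} (L : List α) (Q : α → Bool) (f : α → Int) (b : Int) :
    L.foldl (fun b x => if Q x then max b (f x) else b) b =
      ((L.filter Q).map f).foldl max b := by
  induction L generalizing b with
  | nil => rfl
  | cons x xs ih =>
    by_cases h : Q x <;> simp [h, ih]

lemma foldl_max_mem' (V : List Int) (b : Int) :
    V.foldl max b = b ∨ V.foldl max b ∈ V := by
  induction V generalizing b with
  | nil => exact Or.inl rfl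
  | cons x xs ih =>
    rcases ih (max b x) with h | h
    · rcases max_choice b x with h' | h' <;> rw [List.foldl_cons, h, h']
      · exact Or.inl rfl
      · exact Or.inr (List.mem_cons_self)
    · exact Or.inr (List.mem_cons_of_mem _ h)

lemma le_foldl_max' (V : List Int) (b : Int) :
    b ≤ V.foldl max b ∧ ∀ x ∈ V, x ≤ V.foldl max b := by
  induction V generalizing b with
  | nil => exact ⟨le_refl _, by simp⟩
  | cons y ys ih =>
    obtain ⟨h1, h2⟩ := ih (max b y)
    refine ⟨le_trans (le_max_left _ _) h1, ?_⟩
    intro x hx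
    rcases List.mem_cons.mp hx with rfl | hx
    · exact le_trans (le_max_right _ _) h1
    · exact h2 x hx

lemma foldl_max_eq_of_mem_iff (b : Int) (V W : List Int)
    (h : ∀ x, x ∈ V ↔ x ∈ W) : V.foldl max b = W.foldl max b := by
  have key : ∀ (V W : List Int), (∀ x, x ∈ V → x ∈ W) → V.foldl max b ≤ W.foldl max b := by
    intro V W hsub
    rcases foldl_max_mem' V b with he | hm
    · rw [he]; exact (le_foldl_max' W b).1
    · exact (le_foldl_max' W b).2 _ (hsub _ hm)
  exact le_antisymm (key V W (fun x => (h x).mp)) (key W V (fun x => (h x).mpr))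

-- bounded position scan = substring membership, for nonempty kw
lemma any_prefix_iff_isIn (kw t : List Char) (hk : kw ≠ []) :
    (∃ i < t.length, kw.isPrefixOf (t.drop i)) ↔ PySem.Chars.isIn kw t = true := by
  rw [← PySem.Chars.exists_prefix_drop_iff_isIn]
  constructor
  · rintro ⟨i, _, hp⟩
    exact ⟨i, List.isPrefixOf_iff_prefix.mp hp⟩
  · rintro ⟨j, hp⟩
    by_cases hj : j < t.length
    · exact ⟨j, hj, List.isPrefixOf_iff_prefix.mpr hp⟩
    · exfalso
      rw [List.drop_eq_nil_of_le (by omega)] at hp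
      exact hk (List.prefix_nil.mp hp)

lemma all_kw_ne_nil : ∀ q ∈ trlIndicators, ∀ kw ∈ q.2, kw.toList ≠ [] := by decide

lemma trl_pos : ∀ q ∈ trlIndicators, 1 ≤ q.1 := by decide

lemma trl_sorted : trlIndicators.Pairwise (fun a b => b.1 < a.1) := by decide

-- inner/outer fold characterizations used by the verdict
lemma fold_outer {β : Type} (I : List β) (g : β → List Int) (b : Int) :
    I.foldl (fun b i => (g i).foldl max b) b = (I.flatMap g).foldl max b := by
  induction I generalizing b with
  | nil => rfl
  | cons x xs ih => simp [List.flatMap_cons, List.foldl_append, ih]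

-- ===== VERDICT (by name: the statement is the Claim_ definition above) =====
theorem estimate_trl_py_spec : Claim_equal_estimate_trl_py := by
  intro d _
  unfold Spec_estimate_trl_py estimate_trl_py estimate_trl_py_alt
  rw [sorted_trl]
  set dl := PySem.Str.lower d with hdl
  set t := dl.toList with ht
  -- B's double fold = max fold over the flattened matched values
  have hinner : ∀ (b : Int) (i : Nat),
      keywordTrl.foldl
        (fun b p => if b < p.2 && p.1.toList.isPrefixOf (t.drop i) then p.2 else b) b
      = ((keywordTrl.filter (fun p => p.1.toList.isPrefixOf (t.drop i))).map (·.2)).foldl max b := by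
    intro b i
    rw [step_eq]
    exact fold_guard_max _ _ _ _
  simp only [hinner]
  rw [fold_outer]
  set V := (List.range t.length).flatMap
      (fun i => (keywordTrl.filter (fun p => p.1.toList.isPrefixOf (t.drop i))).map (·.2)) with hV
  set W := (trlIndicators.filter
      (fun q => q.2.any (fun ind => PySem.Chars.isIn ind.toList t))).map (·.1) with hW
  have hmem : ∀ x, x ∈ V ↔ x ∈ W := by
    intro x
    constructor
    · rintro hx
      rw [hV] at hx
      rcases List.mem_flatMap.mp hx with ⟨i, hi, hx⟩
      rcases List.mem_map.mp hx with ⟨p, hp, rfl⟩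
      rcases List.mem_filter.mp hp with ⟨hpk, hpre⟩
      rcases List.mem_flatMap.mp (keywordTrl_eq ▸ hpk) with ⟨q, hq, hkw⟩
      rcases List.mem_map.mp hkw with ⟨kw, hkwq, rfl⟩
      rw [hW]
      refine List.mem_map.mpr ⟨q, List.mem_filter.mpr ⟨hq, ?_⟩, rfl⟩
      refine List.any_eq_true.mpr ⟨kw, hkwq, ?_⟩
      exact (any_prefix_iff_isIn kw.toList t (all_kw_ne_nil q hq kw hkwq)).mp
        ⟨i, List.mem_range.mp hi, hpre⟩
    · rintro hx
      rw [hW] at hx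
      rcases List.mem_map.mp hx with ⟨q, hq, rfl⟩
      rcases List.mem_filter.mp hq with ⟨hqt, hhit⟩
      rcases List.any_eq_true.mp hhit with ⟨kw, hkwq, hin⟩
      rcases (any_prefix_iff_isIn kw.toList t (all_kw_ne_nil q hqt kw hkwq)).mpr hin
        with ⟨i, hi, hpre⟩
      rw [hV]
      refine List.mem_flatMap.mpr ⟨i, List.mem_range.mpr hi, ?_⟩
      refine List.mem_map.mpr ⟨(kw, q.1), List.mem_filter.mpr ⟨?_, hpre⟩, rfl⟩
      rw [keywordTrl_eq]
      exact List.mem_flatMap.mpr ⟨q, hqt, List.mem_map.mpr ⟨kw, hkwq, rfl⟩⟩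
  rw [foldl_max_eq_of_mem_iff 0 V W hmem]
  -- A's loop = first hit of the filtered list
  rw [findTrl_eq_filter]
  have hpredeq : (fun p : Int × List String => p.2.any fun ind => PySem.Str.isIn ind dl)
      = (fun q : Int × List String => q.2.any fun ind => PySem.Chars.isIn ind.toList t) := by
    funext p
    simp [pysem, ht]
  rw [hpredeq]
  rw [hW]
  rcases hF : trlIndicators.filter
      (fun q => q.2.any (fun ind => PySem.Chars.isIn ind.toList t)) with _ | ⟨q, rest⟩
  · rw [hF]; simp
  · rw [hF]
    have hdesc : (q :: rest).Pairwise (fun a b : Int × List String => b.1 < a.1) := by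
      rw [← hF]; exact trl_sorted.filter _
    have hq1 : 1 ≤ q.1 := trl_pos q (List.mem_of_mem_filter (hF ▸ List.mem_cons_self))
    have hlt : ∀ y ∈ rest, y.1 < q.1 := fun y hy => (List.pairwise_cons.mp hdesc).1 y hy
    set Wv := ((q :: rest).map (fun p : Int × List String => p.1)) with hWv
    have hub : ∀ x ∈ Wv, x ≤ q.1 := by
      intro x hx
      rcases List.mem_map.mp hx with ⟨p, hp, rfl⟩
      rcases List.mem_cons.mp hp with rfl | hp
      · exact le_refl _
      · exact le_of_lt (hlt p hp)
    have hle : Wv.foldl max 0 ≤ q.1 := by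
      rcases foldl_max_mem' Wv 0 with he | hm
      · omega
      · exact hub _ hm
    have hge : q.1 ≤ Wv.foldl max 0 :=
      (le_foldl_max' Wv 0).2 q.1 (List.mem_map.mpr ⟨q, List.mem_cons_self, rfl⟩)
    have hbest : Wv.foldl max 0 = q.1 := le_antisymm hle hge
    rw [hbest, if_neg (by omega)]
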